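-- pv_equiv track=rewrite | github.com/amitcjmu/Stock-Analysis | backend/app/api/v1/discovery/asset_handlers/asset_utils.py | standardize_os_family
-- ===== SOURCE A (Python) =====
-- def standardize_os_family(os_name: str) -> str:
--     """Standardize operating system family."""
--     try:
--         if not os_name:
--             return "Unknown"
--
--         os_lower = os_name.lower().strip()
--
--         # Windows family
--         if any(win in os_lower for win in ["windows", "win", "microsoft"]):
--             return "Windows"
--
--         # Linux family
--         elif any(
--             linux in os_lower
--             for linux in [
--                 "linux",
--                 "ubuntu",
--                 "redhat",
--                 "rhel",
--                 "centos",
--                 "debian",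
--                 "suse",
--                 "fedora",
--                 "mint",
--                 "kali",
--                 "arch",
--             ]
--         ):
--             return "Linux"
--
--         # Unix family
--         elif any(
--             unix in os_lower for unix in ["unix", "aix", "solaris", "hpux", "hp-ux"]
--         ):
--             return "Unix"
--
--         # macOS family
--         elif any(mac in os_lower for mac in ["mac", "darwin", "osx", "macos"]):
--             return "macOS"
--
--         # BSD family
--         elif any(
--             bsd in os_lower for bsd in ["bsd", "freebsd", "openbsd", "netbsd"]
--         ):
--             return "BSD"
--
--         # Other
--         else:
--             return "Other"
--
--     except Exception:
--         return "Unknown"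
-- ===== SOURCE B (Python) =====
-- # One keyword->rank dictionary; scan every window of the name (max keyword length 9),
-- # look each window up in the dict, and keep the smallest family rank seen.
-- _RANK = {
--     "windows": 0, "win": 0, "microsoft": 0,
--     "linux": 1, "ubuntu": 1, "redhat": 1, "rhel": 1, "centos": 1, "debian": 1,
--     "suse": 1, "fedora": 1, "mint": 1, "kali": 1, "arch": 1,
--     "unix": 2, "aix": 2, "solaris": 2, "hpux": 2, "hp-ux": 2,
--     "mac": 3, "darwin": 3, "osx": 3, "macos": 3,
--     "bsd": 4, "freebsd": 4, "openbsd": 4, "netbsd": 4,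
-- }
-- _FAMILIES = ["Windows", "Linux", "Unix", "macOS", "BSD"]
-- _MAXLEN = 9  # length of the longest keyword ("microsoft")
--
--
-- def standardize_os_family(os_name: str) -> str:
--     """Standardize operating system family (sliding-window dictionary scan)."""
--     if not os_name:
--         return "Unknown"
--     s = os_name.lower().strip()
--     n = len(s)
--     best = 5
--     for i in range(n):
--         for j in range(i + 1, min(i + _MAXLEN, n) + 1):
--             r = _RANK.get(s[i:j], 5)
--             if r < best:
--                 best = r
--     return _FAMILIES[best] if best < 5 else "Other"
-- ===== Notes on version B (the rewrite author's own statement) =====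
-- stated objective: alternative
-- what changed: Instead of testing each of the 26 keywords for containment family by family, B slides a window over the lowered name, looks every window (length <= 9) up in a single keyword-to-rank dictionary, and returns the family of the minimal rank found.
import Mathlib
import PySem

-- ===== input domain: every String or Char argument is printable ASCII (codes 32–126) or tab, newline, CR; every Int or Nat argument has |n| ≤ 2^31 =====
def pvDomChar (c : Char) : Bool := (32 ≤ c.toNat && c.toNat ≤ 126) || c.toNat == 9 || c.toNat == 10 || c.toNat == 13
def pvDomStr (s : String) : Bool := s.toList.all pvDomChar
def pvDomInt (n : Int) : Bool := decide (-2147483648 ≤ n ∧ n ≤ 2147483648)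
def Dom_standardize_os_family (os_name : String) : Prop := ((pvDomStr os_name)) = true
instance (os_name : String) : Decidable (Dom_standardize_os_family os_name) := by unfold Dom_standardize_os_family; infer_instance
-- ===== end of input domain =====

-- B replaces A's per-keyword substring tests by a sliding-window scan of the name against a
-- single keyword->rank dictionary, keeping the minimal family rank seen (alternative algorithm).

-- ===== PORT A =====
-- helper for 'any(k in os_lower for k in kws)'
def pvAny (kws : List String) (os_lower : String) : Bool :=
  kws.any (fun k => PySem.Str.isIn k os_lower)

-- the if/elif chain of A on the lowered, stripped name
def pvChain (os_lower : String) : String :=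
  if pvAny ["windows", "win", "microsoft"] os_lower then "Windows"
  else if pvAny ["linux", "ubuntu", "redhat", "rhel", "centos", "debian", "suse",
                 "fedora", "mint", "kali", "arch"] os_lower then "Linux"
  else if pvAny ["unix", "aix", "solaris", "hpux", "hp-ux"] os_lower then "Unix"
  else if pvAny ["mac", "darwin", "osx", "macos"] os_lower then "macOS"
  else if pvAny ["bsd", "freebsd", "openbsd", "netbsd"] os_lower then "BSD"
  else "Other"

def standardize_os_family (os_name : String) : String :=
  if os_name = "" then "Unknown"
  else pvChain (PySem.Str.strip (PySem.Str.lower os_name))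

-- ===== PORT B =====
-- the _RANK dict of Source B (keyword -> family rank), as a PySem.Dict
def pvKW : List (String × Int) :=
  [("windows", 0), ("win", 0), ("microsoft", 0),
   ("linux", 1), ("ubuntu", 1), ("redhat", 1), ("rhel", 1), ("centos", 1), ("debian", 1),
   ("suse", 1), ("fedora", 1), ("mint", 1), ("kali", 1), ("arch", 1),
   ("unix", 2), ("aix", 2), ("solaris", 2), ("hpux", 2), ("hp-ux", 2),
   ("mac", 3), ("darwin", 3), ("osx", 3), ("macos", 3),
   ("bsd", 4), ("freebsd", 4), ("openbsd", 4), ("netbsd", 4)]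

def pvRANK : PySem.Dict String Int := PySem.Dict.mk pvKW

def pvFAMS : List String := ["Windows", "Linux", "Unix", "macOS", "BSD"]

-- the nested window loop of Source B: minimal rank of any window s[i:j] present in the dict
def pvBest (s : String) : Int :=
  (PySem.List.pyRange 0 (PySem.Str.len s) 1).foldl (fun best i =>
    (PySem.List.pyRange (i + 1) (min (i + 9) (PySem.Str.len s) + 1) 1).foldl (fun best j =>
      let r := PySem.Dict.getD pvRANK (PySem.Str.slice s (some i) (some j)) 5
      if r < best then r else best) best) 5

def standardize_os_family_alt (os_name : String) : String :=
  if os_name = "" then "Unknown"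
  else
    let s := PySem.Str.strip (PySem.Str.lower os_name)
    -- '_FAMILIES[best]': under the guard, best is provably in 0..4, so pyGetD's default is never used
    if pvBest s < 5 then PySem.List.pyGetD pvFAMS (pvBest s) "Other" else "Other"

-- ===== PRECONDITION & SPEC =====
def Spec_standardize_os_family (os_name : String) (out : String) : Prop := out = standardize_os_family_alt os_name
instance (os_name : String) (out : String) : Decidable (Spec_standardize_os_family os_name out) := by unfold Spec_standardize_os_family; infer_instance

-- ===== CLAIM (what is proved, stated in full; the proofs are below) =====
def Claim_equal_standardize_os_family : Prop := ∀ (os_name : String), Dom_standardize_os_family os_name → Spec_standardize_os_family os_name (standardize_os_family os_name)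

-- ===== LEMMAS AND PROOFS =====

-- "some keyword of priority ≤ r matches t"
def pvMt (t : String) (r : Int) : Prop :=
  ∃ p ∈ pvKW, p.2 ≤ r ∧ PySem.Str.isIn p.1 t = true

-- the rank Source B looks up for window t[i:j]
def pvWr (t : String) (i j : Int) : Int :=
  PySem.Dict.getD pvRANK (PySem.Str.slice t (some i) (some j)) 5

-- generic: a foldl keeping a running minimum, characterised by ≤
lemma pv_foldl_min_le_iff {α : Type} (v : Int) (Q : α → Prop) :
    ∀ (l : List α) (g : Int → α → Int), (∀ b x, x ∈ l → (g b x ≤ v ↔ b ≤ v ∨ Q x)) →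
    ∀ init, (l.foldl g init ≤ v ↔ init ≤ v ∨ ∃ x ∈ l, Q x) := by
  intro l
  induction l with
  | nil => intro g _ init; simp
  | cons x xs ih =>
    intro g hg init
    have h1 := ih g (fun b y hy => hg b y (List.mem_cons_of_mem x hy)) (g init x)
    have h2 := hg init x (List.mem_cons_self)
    simp only [List.foldl_cons]
    rw [h1]
    constructor
    · rintro (h | h)
      · rcases h2.mp h with h' | h'
        · exact Or.inl h'
        · exact Or.inr ⟨x, List.mem_cons_self, h'⟩
      · rcases h with ⟨y, hy, hQ⟩
        exact Or.inr ⟨y, List.mem_cons_of_mem x hy, hQ⟩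
    · rintro (h | ⟨y, hy, hQ⟩)
      · exact Or.inl (h2.mpr (Or.inl h))
      · rcases List.mem_cons.mp hy with rfl | hy'
        · exact Or.inl (h2.mpr (Or.inr hQ))
        · exact Or.inr ⟨y, hy', hQ⟩

lemma pvBest_le_iff (t : String) (v : Int) :
    pvBest t ≤ v ↔ 5 ≤ v ∨
      ∃ i ∈ PySem.List.pyRange 0 (PySem.Str.len t) 1,
        ∃ j ∈ PySem.List.pyRange (i + 1) (min (i + 9) (PySem.Str.len t) + 1) 1,
          pvWr t i j ≤ v := by
  unfold pvBest
  apply pv_foldl_min_le_iff v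
      (fun i => ∃ j ∈ PySem.List.pyRange (i + 1) (min (i + 9) (PySem.Str.len t) + 1) 1, pvWr t i j ≤ v)
  intro b i _
  apply pv_foldl_min_le_iff v (fun j => pvWr t i j ≤ v)
  intro b' j _
  simp only [pvWr]
  split_ifs <;> omega

-- every keyword of the dict looks itself up, has rank 0..4 and length 1..9
set_option maxHeartbeats 1000000 in
lemma pv_rank_mem : ∀ p ∈ pvKW, PySem.Dict.getD pvRANK p.1 5 = p.2 := by decide
lemma pv_rank_bounds : ∀ p ∈ pvKW, 0 ≤ p.2 ∧ p.2 ≤ 4 := by decide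
set_option maxHeartbeats 1000000 in
lemma pv_kw_len : ∀ p ∈ pvKW, 1 ≤ p.1.toList.length ∧ p.1.toList.length ≤ 9 := by decide

-- a lookup either returns the default or an entry of the association list
lemma pv_getD_cases {κ ν : Type} [BEq κ] [LawfulBEq κ] (l : List (κ × ν)) (k : κ) (dflt : ν) :
    PySem.Dict.getD (PySem.Dict.mk l) k dflt = dflt ∨
      (k, PySem.Dict.getD (PySem.Dict.mk l) k dflt) ∈ l := by
  induction l with
  | nil => left; rfl
  | cons p rest ih =>
    obtain ⟨a, v⟩ := p
    rw [PySem.Dict.getD, PySem.Dict.get?_mk_cons]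
    by_cases h : (a == k) = true
    · right; simp [h]; left; exact (eq_of_beq h).symm
    · simp only [h]
      rcases ih with h' | h'
      · left; exact h'
      · right; exact List.mem_cons_of_mem _ h'

-- a take-of-drop is an infix
lemma pv_take_drop_infix (l : List Char) (m n : Nat) : (List.take n (List.drop m l)) <:+: l := by
  refine ⟨l.take m, List.drop n (l.drop m), ?_⟩
  rw [List.append_assoc, List.take_append_drop, List.take_append_drop]

-- the windows Source B enumerates are exactly the substrings the keywords can be
lemma pv_window_iff (t : String) (r : Int) (hr : r < 5) :
    (∃ i ∈ PySem.List.pyRange 0 (PySem.Str.len t) 1,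
      ∃ j ∈ PySem.List.pyRange (i + 1) (min (i + 9) (PySem.Str.len t) + 1) 1,
        pvWr t i j ≤ r) ↔ pvMt t r := by
  constructor
  · rintro ⟨i, hi, j, hj, hw⟩
    rw [PySem.List.mem_pyRange_one] at hi hj
    rcases pv_getD_cases pvKW (PySem.Str.slice t (some i) (some j)) 5 with h5 | hmem
    · exfalso; unfold pvWr pvRANK at hw; omega
    · refine ⟨_, hmem, hw, ?_⟩
      rw [PySem.Str.isIn_iff_infix]
      obtain ⟨a, rfl⟩ : ∃ a : Nat, i = (a : Int) := ⟨i.toNat, (Int.toNat_of_nonneg hi.1).symm⟩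
      obtain ⟨b, rfl⟩ : ∃ b : Nat, j = (b : Int) := ⟨j.toNat, (Int.toNat_of_nonneg (by omega)).symm⟩
      simp only [PySem.Str.slice, PySem.Chars.slice, PySem.List.slice_natCast, String.toList_ofList]
      exact pv_take_drop_infix _ _ _
  · rintro ⟨p, hp, hpr, hin⟩
    rw [PySem.Str.isIn_iff_infix] at hin
    rcases hin with ⟨pre, suf, heq⟩
    have hlen := pv_kw_len p hp
    have hlt : t.toList.length = pre.length + p.1.toList.length + suf.length := by
      rw [← heq]; simp [List.length_append]; omega
    have hdrop : List.drop pre.length t.toList = p.1.toList ++ suf := by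
      rw [← heq, List.append_assoc, List.drop_left]
    have hslice : PySem.Str.slice t (some ((pre.length : Nat) : Int))
        (some ((pre.length + p.1.toList.length : Nat) : Int)) = p.1 := by
      simp only [PySem.Str.slice, PySem.Chars.slice, PySem.List.slice_natCast]
      rw [hdrop, Nat.add_sub_cancel_left, List.take_left, String.ofList_toList]
    refine ⟨(pre.length : Int), ?_, ((pre.length + p.1.toList.length : Nat) : Int), ?_, ?_⟩
    · rw [PySem.List.mem_pyRange_one, PySem.Str.len_eq]
      constructor <;> omega
    · rw [PySem.List.mem_pyRange_one, PySem.Str.len_eq]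
      push_cast
      constructor <;> omega
    · rw [pvWr, hslice, pv_rank_mem p hp]
      exact hpr

lemma pvBest_eq (t : String) (f : Int) (h5 : f < 5)
    (hM : pvMt t f) (hN : ¬ pvMt t (f - 1)) : pvBest t = f := by
  have hub : pvBest t ≤ f :=
    (pvBest_le_iff t f).mpr (Or.inr ((pv_window_iff t f h5).mpr hM))
  have hlb : ¬ pvBest t ≤ f - 1 := by
    intro h
    rcases (pvBest_le_iff t (f - 1)).mp h with h' | h'
    · omega
    · exact hN ((pv_window_iff t (f - 1) (by omega)).mp h')
  omega

lemma pvBest_none (t : String) (hN : ¬ pvMt t 4) : pvBest t = 5 := by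
  have hub : pvBest t ≤ 5 := (pvBest_le_iff t 5).mpr (Or.inl le_rfl)
  have hlb : ¬ pvBest t ≤ 4 := by
    intro h
    rcases (pvBest_le_iff t 4).mp h with h' | h'
    · omega
    · exact hN ((pv_window_iff t 4 (by omega)).mp h')
  omega

-- pvMt at each concrete priority, in terms of A's any-tests
set_option maxHeartbeats 1000000 in
lemma pvMt0 (t : String) : pvMt t 0 ↔ pvAny ["windows", "win", "microsoft"] t = true := by
  simp [pvMt, pvKW, pvAny]

set_option maxHeartbeats 1000000 in
lemma pvMt1 (t : String) : pvMt t 1 ↔ (pvAny ["windows", "win", "microsoft"] t = true ∨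
    pvAny ["linux", "ubuntu", "redhat", "rhel", "centos", "debian", "suse",
           "fedora", "mint", "kali", "arch"] t = true) := by
  simp [pvMt, pvKW, pvAny, or_assoc]

set_option maxHeartbeats 1000000 in
lemma pvMt2 (t : String) : pvMt t 2 ↔ (pvMt t 1 ∨
    pvAny ["unix", "aix", "solaris", "hpux", "hp-ux"] t = true) := by
  rw [pvMt1]
  simp [pvMt, pvKW, pvAny, or_assoc]

set_option maxHeartbeats 1000000 in
lemma pvMt3 (t : String) : pvMt t 3 ↔ (pvMt t 2 ∨
    pvAny ["mac", "darwin", "osx", "macos"] t = true) := by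
  rw [pvMt2, pvMt1]
  simp [pvMt, pvKW, pvAny, or_assoc]

set_option maxHeartbeats 1000000 in
lemma pvMt4 (t : String) : pvMt t 4 ↔ (pvMt t 3 ∨
    pvAny ["bsd", "freebsd", "openbsd", "netbsd"] t = true) := by
  rw [pvMt3, pvMt2, pvMt1]
  simp [pvMt, pvKW, pvAny, or_assoc]

lemma pvMtNeg (t : String) : ¬ pvMt t (-1) := by
  rintro ⟨p, hp, hpr, _⟩
  have := pv_rank_bounds p hp
  omega

-- the core equality between B's table scan and A's chain
lemma pv_core_eq (t : String) :
    (if pvBest t < 5 then PySem.List.pyGetD pvFAMS (pvBest t) "Other" else "Other") = pvChain t := by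
  unfold pvChain
  by_cases h0 : pvAny ["windows", "win", "microsoft"] t = true
  · rw [pvBest_eq t 0 (by omega) ((pvMt0 t).mpr h0) (pvMtNeg t)]
    simp [h0, pvFAMS]
  · by_cases h1 : pvAny ["linux", "ubuntu", "redhat", "rhel", "centos", "debian", "suse",
        "fedora", "mint", "kali", "arch"] t = true
    · rw [pvBest_eq t 1 (by omega) ((pvMt1 t).mpr (Or.inr h1))
        (by rw [show (1:Int) - 1 = 0 by ring, pvMt0]; exact h0)]
      simp [h0, h1, pvFAMS]; try decide
    · have hn1 : ¬ pvMt t 1 := by rw [pvMt1]; tauto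
      by_cases h2 : pvAny ["unix", "aix", "solaris", "hpux", "hp-ux"] t = true
      · rw [pvBest_eq t 2 (by omega) ((pvMt2 t).mpr (Or.inr h2))
          (by rw [show (2:Int) - 1 = 1 by ring]; exact hn1)]
        simp [h0, h1, h2, pvFAMS]; try decide
      · have hn2 : ¬ pvMt t 2 := by rw [pvMt2]; tauto
        by_cases h3 : pvAny ["mac", "darwin", "osx", "macos"] t = true
        · rw [pvBest_eq t 3 (by omega) ((pvMt3 t).mpr (Or.inr h3))
            (by rw [show (3:Int) - 1 = 2 by ring]; exact hn2)]
          simp [h0, h1, h2, h3, pvFAMS]; try decide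
        · have hn3 : ¬ pvMt t 3 := by rw [pvMt3]; tauto
          by_cases h4 : pvAny ["bsd", "freebsd", "openbsd", "netbsd"] t = true
          · rw [pvBest_eq t 4 (by omega) ((pvMt4 t).mpr (Or.inr h4))
              (by rw [show (4:Int) - 1 = 3 by ring]; exact hn3)]
            simp [h0, h1, h2, h3, h4, pvFAMS]; try decide
          · have hn4 : ¬ pvMt t 4 := by rw [pvMt4]; tauto
            rw [pvBest_none t hn4]
            simp [h0, h1, h2, h3, h4]

-- ===== VERDICT (by name: the statement is the Claim_ definition above) =====
theorem standardize_os_family_spec : Claim_equal_standardize_os_family := by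
  intro os_name _
  unfold Spec_standardize_os_family standardize_os_family standardize_os_family_alt
  by_cases h : os_name = ""
  · simp [h]
  · simp only [h, if_false]
    exact (pv_core_eq _).symm
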